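-- pv_equiv track=rewrite | github.com/wangsun39/leetcode | allcode/1900-1999/1927sumGame.py | sumGame
-- ===== SOURCE A (Python) =====
-- def sumGame(num: str) -> bool:
--     n = len(num)
--     s1 = s2 = 0  # 左右数字和
--     f1 = f2 = 0  # 左右问号和
--     if (f1 + f2) & 1:  # 最后由Alice替换?,一定是Alice胜
--         return True
--
--     # Alice按贪心的策略，让左侧和变的尽可能大，左边问号都放1，右边问号都放0，剩下的问号，Bob能否平衡
--     def f(s1, s2, f1, f2):
--         if f1 >= f2:
--             la = f2 + (f1 - f2 + 1) // 2  # Alice能替换的左侧问号数量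
--             ra = 0  # Alice能替换的右侧问号数量
--         else:
--             la = f1
--             ra = (f2 - f1 + 1) // 2
--         lb = f1 - la
--         rb = f2 - ra
--         s1 += la * 9
--         if s1 - s2 <= rb * 9:  # 差值在Bob的控制范围之内
--             return False
--         return True
--
--     for x in num[:n // 2]:
--         if x.isdigit():
--             s1 += int(x)
--         else:
--             f1 += 1
--     for x in num[n // 2:]:
--         if x.isdigit():
--             s2 += int(x)
--         else:
--             f2 += 1
--     return f(s1, s2, f1, f2) or f(s2, s1, f2, f1)
-- ===== SOURCE B (Python) =====
-- def sumGame(num: str) -> bool: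
--     n = len(num)
--     s = f = 0  # signed digit-sum and question-mark-count difference (left minus right)
--     h = n // 2
--     for i, x in enumerate(num):
--         sign = 1 if i < h else -1
--         if x.isdigit():
--             s += sign * int(x)
--         else:
--             f += sign
--     return f % 2 != 0 or 9 * f != -2 * s
-- ===== Notes on version B (the rewrite author's own statement) =====
-- stated objective: simpler
-- what changed: Replaces A's two symmetric greedy game-simulation calls (helper f with la/ra/lb/rb case analysis over two half-string passes) by one enumerate pass accumulating signed digit-sum and question-mark differences, decided by the closed-form predicate f % 2 != 0 or 9*f != -2*s.
import Mathlib
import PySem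

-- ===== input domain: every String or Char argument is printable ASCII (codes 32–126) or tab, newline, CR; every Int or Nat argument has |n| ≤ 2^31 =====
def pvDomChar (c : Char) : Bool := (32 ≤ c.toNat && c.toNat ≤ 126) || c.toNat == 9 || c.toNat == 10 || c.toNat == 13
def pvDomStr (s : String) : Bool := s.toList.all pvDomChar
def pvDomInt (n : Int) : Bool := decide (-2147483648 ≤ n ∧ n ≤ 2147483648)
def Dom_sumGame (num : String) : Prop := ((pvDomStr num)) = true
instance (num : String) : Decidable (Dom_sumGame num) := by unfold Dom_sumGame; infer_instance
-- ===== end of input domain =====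

-- B replaces A's two greedy game-simulation calls over two half passes by one signed pass and a closed-form predicate (simpler; return value only).

-- ===== PORT A =====
-- int(x) for a one-char digit string (guarded by isdigit, ASCII domain): exact as x.toNat - 48
def pvDigitVal (x : Char) : Int := (x.toNat : Int) - 48

-- the nested helper f of A
def sumGameF (s1 s2 f1 f2 : Int) : Bool :=
  let lr : Int × Int :=
    if f1 ≥ f2 then (f2 + PySem.Int.floordiv (f1 - f2 + 1) 2, 0)
    else (f1, PySem.Int.floordiv (f2 - f1 + 1) 2)
  let la := lr.1
  let ra := lr.2
  let _lb := f1 - la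
  let rb := f2 - ra
  let s1' := s1 + la * 9
  if s1' - s2 ≤ rb * 9 then false else true

def sumGame (num : String) : Bool :=
  let n : Int := PySem.Str.len num
  let s1 : Int := 0
  let s2 : Int := 0
  let f1 : Int := 0
  let f2 : Int := 0
  if PySem.Int.band (f1 + f2) 1 ≠ 0 then true  -- dead branch kept from A (f1 = f2 = 0 here)
  else
    let p1 := (PySem.List.slice num.toList none (some (PySem.Int.floordiv n 2))).foldl
      (fun (p : Int × Int) x =>
        if PySem.Chars.isdigit x then (p.1 + pvDigitVal x, p.2) else (p.1, p.2 + 1)) (s1, f1)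
    let p2 := (PySem.List.slice num.toList (some (PySem.Int.floordiv n 2)) none).foldl
      (fun (p : Int × Int) x =>
        if PySem.Chars.isdigit x then (p.1 + pvDigitVal x, p.2) else (p.1, p.2 + 1)) (s2, f2)
    sumGameF p1.1 p2.1 p1.2 p2.2 || sumGameF p2.1 p1.1 p2.2 p1.2

-- ===== PORT B =====
def sumGame_alt (num : String) : Bool :=
  let n : Int := PySem.Str.len num
  let h : Int := PySem.Int.floordiv n 2
  let p := (PySem.List.enumerate num.toList).foldl
    (fun (p : Int × Int) ix =>
      let sign : Int := if ix.1 < h then 1 else -1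
      if PySem.Chars.isdigit ix.2 then (p.1 + sign * pvDigitVal ix.2, p.2)
      else (p.1, p.2 + sign)) ((0 : Int), (0 : Int))
  (PySem.Int.mod p.2 2 != 0) || (9 * p.2 != -2 * p.1)

-- ===== PRECONDITION & SPEC =====
def Spec_sumGame (num : String) (out : Bool) : Prop := out = sumGame_alt num
instance (num : String) (out : Bool) : Decidable (Spec_sumGame num out) := by unfold Spec_sumGame; infer_instance

-- ===== CLAIM (what is proved, stated in full; the proofs are below) =====
def Claim_equal_sumGame : Prop := ∀ (num : String), Dom_sumGame num → Spec_sumGame num (sumGame num)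

-- ===== LEMMAS AND PROOFS =====

-- closed forms of the accumulating folds
def pvSum (l : List Char) : Int := (l.map (fun x => if PySem.Chars.isdigit x then pvDigitVal x else 0)).sum
def pvCnt (l : List Char) : Int := ((l.filter (fun x => !PySem.Chars.isdigit x)).length : Int)

theorem pvSum_cons (x : Char) (l : List Char) :
    pvSum (x :: l) = (if PySem.Chars.isdigit x then pvDigitVal x else 0) + pvSum l := by
  simp [pvSum]

theorem pvCnt_cons (x : Char) (l : List Char) :
    pvCnt (x :: l) = (if PySem.Chars.isdigit x then 0 else 1) + pvCnt l := by
  simp only [pvCnt, List.filter]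
  split_ifs with h
  · simp [h]
  · simp [h]
    omega

theorem foldA_closed (l : List Char) (s f : Int) :
    l.foldl (fun (p : Int × Int) x =>
        if PySem.Chars.isdigit x then (p.1 + pvDigitVal x, p.2) else (p.1, p.2 + 1)) (s, f)
      = (s + pvSum l, f + pvCnt l) := by
  induction l generalizing s f with
  | nil => simp [pvSum, pvCnt]
  | cons x l ih =>
    simp only [List.foldl_cons, pvSum_cons, pvCnt_cons]
    split_ifs with h <;> rw [ih] <;> ring_nf

theorem foldB_lt (l : List Char) (i h : Int) (q : Int × Int) (hle : i + l.length ≤ h) :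
    (PySem.List.enumerate l i).foldl
      (fun (p : Int × Int) ix =>
        let sign : Int := if ix.1 < h then 1 else -1
        if PySem.Chars.isdigit ix.2 then (p.1 + sign * pvDigitVal ix.2, p.2)
        else (p.1, p.2 + sign)) q
      = (q.1 + pvSum l, q.2 + pvCnt l) := by
  induction l generalizing i q with
  | nil => simp [PySem.List.enumerate_nil, pvSum, pvCnt]
  | cons x l ih =>
    have hi : i < h := by
      have : (0 : Int) ≤ l.length := by positivity
      simp at hle; omega
    simp only [PySem.List.enumerate_cons, List.foldl_cons, pvSum_cons, pvCnt_cons, hi, if_true]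
    have hle' : (i + 1) + l.length ≤ h := by simp at hle ⊢; omega
    split_ifs with hd <;> rw [ih _ _ hle'] <;> simp <;> ring_nf

theorem foldB_ge (l : List Char) (i h : Int) (q : Int × Int) (hge : h ≤ i) :
    (PySem.List.enumerate l i).foldl
      (fun (p : Int × Int) ix =>
        let sign : Int := if ix.1 < h then 1 else -1
        if PySem.Chars.isdigit ix.2 then (p.1 + sign * pvDigitVal ix.2, p.2)
        else (p.1, p.2 + sign)) q
      = (q.1 - pvSum l, q.2 - pvCnt l) := by
  induction l generalizing i q with
  | nil => simp [PySem.List.enumerate_nil, pvSum, pvCnt]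
  | cons x l ih =>
    have hi : ¬ (i < h) := by omega
    simp only [PySem.List.enumerate_cons, List.foldl_cons, pvSum_cons, pvCnt_cons, hi, if_false]
    have hge' : h ≤ i + 1 := by omega
    split_ifs with hd <;> rw [ih _ _ hge'] <;> simp <;> ring_nf

-- the arithmetic heart: A's two game calls equal B's closed-form predicate
theorem key (s1 s2 f1 f2 : Int) :
    (sumGameF s1 s2 f1 f2 || sumGameF s2 s1 f2 f1)
      = ((PySem.Int.mod (f1 - f2) 2 != 0) || (9 * (f1 - f2) != -2 * (s1 - s2))) := by
  apply Bool.eq_iff_iff.mpr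
  simp only [sumGameF, bne_iff_ne, Bool.or_eq_true, ne_eq, ge_iff_le,
    PySem.Int.mod_eq_emod_of_pos (show (0:Int) < 2 by norm_num),
    PySem.Int.floordiv_eq_ediv_of_pos (show (0:Int) < 2 by norm_num)]
  by_cases h : f2 ≤ f1 <;> by_cases h2 : f1 ≤ f2 <;> simp [h, h2] <;> omega

theorem sumGame_eq (num : String) : sumGame num = sumGame_alt num := by
  unfold sumGame sumGame_alt
  have hband : PySem.Int.band ((0:Int) + 0) 1 = 0 := by decide
  set hn : Nat := num.toList.length / 2 with hh
  have hfd : PySem.Int.floordiv ((num.toList.length : Nat) : Int) 2 = (hn : Int) := by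
    exact_mod_cast PySem.Int.floordiv_natCast num.toList.length 2
  have hmin : (num.toList.take hn).length = hn := by
    simp [hh]; omega
  simp only [PySem.Str.len_eq, hfd, hband, ne_eq, not_true_eq_false, if_false]
  rw [PySem.List.slice_to_natCast, PySem.List.slice_from_natCast,
    foldA_closed, foldA_closed]
  conv_rhs => rw [← List.take_append_drop hn num.toList]
  rw [PySem.List.enumerate_append, List.foldl_append,
    foldB_ge _ _ _ _ (by rw [hmin]; omega),
    foldB_lt _ _ _ _ (by rw [hmin]; omega)]
  simp only [zero_add]
  exact key _ _ _ _

-- ===== VERDICT (by name: the statement is the Claim_ definition above) =====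
theorem sumGame_spec : Claim_equal_sumGame := by
  intro num _
  unfold Spec_sumGame
  exact sumGame_eq num
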